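-- pv_equiv track=rewrite | github.com/trac3er00/OMG | runtime/forge_agents.py | _normalize_operation_candidate
-- ===== SOURCE A (Python) =====
-- _OPERATION_SYNONYMS: dict[str, set[str]] = {
--     "add": {"add", "create", "insert", "new", "introduce", "build"},
--     "edit": {"edit", "update", "modify", "change", "adjust", "revise", "patch"},
--     "delete": {"delete", "remove", "drop", "retire", "deprecate", "decommission"},
-- }
--
-- def _normalize_operation_candidate(value: object) -> str:
--     candidate = str(value or "").strip().lower().replace("_", " ").replace("-", " ")
--     if not candidate:
--         return ""
--     if candidate in _OPERATION_SYNONYMS: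
--         return candidate
--     for intent, synonyms in _OPERATION_SYNONYMS.items():
--         if candidate in synonyms:
--             return intent
--     return ""
-- ===== SOURCE B (Python) =====
-- _OPERATION_SYNONYMS: dict[str, set[str]] = {
--     "add": {"add", "create", "insert", "new", "introduce", "build"},
--     "edit": {"edit", "update", "modify", "change", "adjust", "revise", "patch"},
--     "delete": {"delete", "remove", "drop", "retire", "deprecate", "decommission"},
-- }
--
-- # Flat reverse table: each synonym maps to its canonical intent; canonical words
-- # map to themselves because each intent word is a member of its own synonym set.
-- _REVERSE: dict[str, str] = {
--     synonym: intent
--     for intent, synonyms in _OPERATION_SYNONYMS.items()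
--     for synonym in sorted(synonyms)
-- }
--
-- def _normalize_operation_candidate(value: object) -> str:
--     candidate = str(value or "").strip().lower().replace("_", " ").replace("-", " ")
--     if not candidate:
--         return ""
--     return _REVERSE.get(candidate, "")
-- ===== Notes on version B (the rewrite author's own statement) =====
-- stated objective: simpler
-- what changed: Replaced the key-membership check plus nested loop over (intent, synonym-set) pairs with one precomputed flat reverse map synonym->intent and a single dict lookup with the empty default.
import Mathlib
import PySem

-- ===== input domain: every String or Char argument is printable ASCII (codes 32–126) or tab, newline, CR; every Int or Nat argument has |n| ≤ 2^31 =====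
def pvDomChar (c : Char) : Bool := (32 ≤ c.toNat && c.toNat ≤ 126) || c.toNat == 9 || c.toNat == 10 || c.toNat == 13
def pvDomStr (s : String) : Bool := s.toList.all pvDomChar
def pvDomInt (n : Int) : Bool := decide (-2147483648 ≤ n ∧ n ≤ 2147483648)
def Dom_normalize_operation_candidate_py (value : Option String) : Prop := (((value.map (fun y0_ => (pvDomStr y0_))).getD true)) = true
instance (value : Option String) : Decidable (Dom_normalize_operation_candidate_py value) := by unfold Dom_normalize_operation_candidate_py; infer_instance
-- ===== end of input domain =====

-- B replaces A's key-check plus nested loop over (intent, synonym-set) pairs by a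
-- single lookup in a precomputed flat reverse map synonym -> intent (objective: simpler).

-- ===== PORT A =====
-- _OPERATION_SYNONYMS (membership-only use, so set iteration order is irrelevant)
def opSynonyms : PySem.Dict String (PySem.Set String) :=
  PySem.Dict.ofList
    [ ("add", PySem.Set.ofList ["add", "create", "insert", "new", "introduce", "build"])
    , ("edit", PySem.Set.ofList ["edit", "update", "modify", "change", "adjust", "revise", "patch"])
    , ("delete", PySem.Set.ofList ["delete", "remove", "drop", "retire", "deprecate", "decommission"]) ]

-- the 'for intent, synonyms in _OPERATION_SYNONYMS.items()' loop
def pyFindIntent (items : List (String × PySem.Set String)) (candidate : String) : String :=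
  match items with
  | [] => ""
  | (intent, synonyms) :: rest =>
      if PySem.Set.contains synonyms candidate then intent else pyFindIntent rest candidate

def normalize_operation_candidate_py (value : Option String) : String :=
  -- str(value or "") : none and some "" both give ""
  let candidate := PySem.Str.replace (PySem.Str.replace (PySem.Str.lower (PySem.Str.strip (value.getD ""))) "_" " ") "-" " "
  if candidate == "" then ""
  else if opSynonyms.contains candidate then candidate
  else pyFindIntent opSynonyms.items candidate

-- ===== PORT B =====
-- _REVERSE: the flat comprehension's result, pairs in its generation order (sorted per intent)
def revMap : PySem.Dict String String :=
  PySem.Dict.ofList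
    [ ("add", "add"), ("build", "add"), ("create", "add"), ("insert", "add"), ("introduce", "add"), ("new", "add")
    , ("adjust", "edit"), ("change", "edit"), ("edit", "edit"), ("modify", "edit"), ("patch", "edit"), ("revise", "edit"), ("update", "edit")
    , ("decommission", "delete"), ("delete", "delete"), ("deprecate", "delete"), ("drop", "delete"), ("remove", "delete"), ("retire", "delete") ]

def normalize_operation_candidate_py_alt (value : Option String) : String :=
  let candidate := PySem.Str.replace (PySem.Str.replace (PySem.Str.lower (PySem.Str.strip (value.getD ""))) "_" " ") "-" " "
  if candidate == "" then ""
  else revMap.getD candidate ""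

-- ===== PRECONDITION & SPEC =====
def Spec_normalize_operation_candidate_py (value : Option String) (out : String) : Prop := out = normalize_operation_candidate_py_alt value
instance (value : Option String) (out : String) : Decidable (Spec_normalize_operation_candidate_py value out) := by unfold Spec_normalize_operation_candidate_py; infer_instance

-- ===== CLAIM (what is proved, stated in full; the proofs are below) =====
def Claim_equal_normalize_operation_candidate_py : Prop := ∀ (value : Option String), Dom_normalize_operation_candidate_py value → Spec_normalize_operation_candidate_py value (normalize_operation_candidate_py value)

-- ===== LEMMAS AND PROOFS =====
-- the two tails agree on every candidate string
theorem tails_eq (c : String) :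
    (if c == "" then ""
     else if opSynonyms.contains c then c
     else pyFindIntent opSynonyms.items c)
    = (if c == "" then "" else revMap.getD c "") := by
  by_cases h1 : c = "add"
  · subst h1; decide
  by_cases h2 : c = "create"
  · subst h2; decide
  by_cases h3 : c = "insert"
  · subst h3; decide
  by_cases h4 : c = "new"
  · subst h4; decide
  by_cases h5 : c = "introduce"
  · subst h5; decide
  by_cases h6 : c = "build"
  · subst h6; decide
  by_cases h7 : c = "edit"
  · subst h7; decide
  by_cases h8 : c = "update"
  · subst h8; decide
  by_cases h9 : c = "modify"
  · subst h9; decide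
  by_cases h10 : c = "change"
  · subst h10; decide
  by_cases h11 : c = "adjust"
  · subst h11; decide
  by_cases h12 : c = "revise"
  · subst h12; decide
  by_cases h13 : c = "patch"
  · subst h13; decide
  by_cases h14 : c = "delete"
  · subst h14; decide
  by_cases h15 : c = "remove"
  · subst h15; decide
  by_cases h16 : c = "drop"
  · subst h16; decide
  by_cases h17 : c = "retire"
  · subst h17; decide
  by_cases h18 : c = "deprecate"
  · subst h18; decide
  by_cases h19 : c = "decommission"
  · subst h19; decide
  -- c matches no synonym: both sides give ""
  have eA : opSynonyms = PySem.Dict.mk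
      [ ("add", ["add", "create", "insert", "new", "introduce", "build"])
      , ("edit", ["edit", "update", "modify", "change", "adjust", "revise", "patch"])
      , ("delete", ["delete", "remove", "drop", "retire", "deprecate", "decommission"]) ] := by rfl
  have eB : revMap = PySem.Dict.mk
      [ ("add", "add"), ("build", "add"), ("create", "add"), ("insert", "add"), ("introduce", "add"), ("new", "add")
      , ("adjust", "edit"), ("change", "edit"), ("edit", "edit"), ("modify", "edit"), ("patch", "edit"), ("revise", "edit"), ("update", "edit")
      , ("decommission", "delete"), ("delete", "delete"), ("deprecate", "delete"), ("drop", "delete"), ("remove", "delete"), ("retire", "delete") ] := by rfl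
  simp [eA, eB, PySem.Dict.contains, PySem.Dict.getD, PySem.Dict.get?,
        pyFindIntent, PySem.Set.contains, h1, h2, h3, h4, h5, h6, h7, h8, h9, h10, h11, h12, h13, h14, h15, h16, h17, h18, h19, Ne.symm h1, Ne.symm h2, Ne.symm h3, Ne.symm h4, Ne.symm h5, Ne.symm h6, Ne.symm h7, Ne.symm h8, Ne.symm h9, Ne.symm h10, Ne.symm h11, Ne.symm h12, Ne.symm h13, Ne.symm h14, Ne.symm h15, Ne.symm h16, Ne.symm h17, Ne.symm h18, Ne.symm h19]

-- ===== VERDICT (by name: the statement is the Claim_ definition above) =====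
theorem normalize_operation_candidate_py_spec : Claim_equal_normalize_operation_candidate_py := by
  intro value _
  unfold Spec_normalize_operation_candidate_py normalize_operation_candidate_py normalize_operation_candidate_py_alt
  exact tails_eq _
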